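-- pv_equiv track=rewrite | github.com/nbalepur/helpful-coding | backend/agent_endpoints.py | _prepare_suggestions
-- ===== SOURCE A (Python) =====
-- from typing import List, Dict, Optional, Union, Any
--
-- def _prepare_suggestions(raw_suggestions: Optional[List[str]]) -> List[str]:
--     cleaned: List[str] = []
--     if not raw_suggestions:
--         return cleaned
--
--     seen = set()
--     for suggestion in raw_suggestions:
--         if not isinstance(suggestion, str):
--             continue
--         text = suggestion.strip()
--         if not text:
--             continue
--         key = text.casefold()
--         if key in seen:
--             continue
--         seen.add(key)
--         cleaned.append(text)
--
--     cleaned.sort(key=lambda s: s.casefold())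
--     return cleaned
-- ===== SOURCE B (Python) =====
-- from typing import List, Optional
--
-- def _prepare_suggestions(raw_suggestions: Optional[List[str]]) -> List[str]:
--     if not raw_suggestions:
--         return []
--     cleaned = sorted((s.strip() for s in raw_suggestions
--                       if isinstance(s, str) and s.strip()), key=str.casefold)
--     if not cleaned:
--         return []
--     return [cleaned[0]] + [t for prev, t in zip(cleaned, cleaned[1:])
--                            if prev.casefold() != t.casefold()]
-- ===== Notes on version B (the rewrite author's own statement) =====
-- stated objective: alternative
-- what changed: A dedups during the scan with a seen-set and then sorts; B builds the cleaned list declaratively (generator + sorted by casefold) and removes case-insensitive duplicates by a zip-with-shifted-self comprehension that keeps an element only when its casefold differs from its immediate predecessor, relying on sort stability to keep A's first occurrences.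
import Mathlib
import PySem

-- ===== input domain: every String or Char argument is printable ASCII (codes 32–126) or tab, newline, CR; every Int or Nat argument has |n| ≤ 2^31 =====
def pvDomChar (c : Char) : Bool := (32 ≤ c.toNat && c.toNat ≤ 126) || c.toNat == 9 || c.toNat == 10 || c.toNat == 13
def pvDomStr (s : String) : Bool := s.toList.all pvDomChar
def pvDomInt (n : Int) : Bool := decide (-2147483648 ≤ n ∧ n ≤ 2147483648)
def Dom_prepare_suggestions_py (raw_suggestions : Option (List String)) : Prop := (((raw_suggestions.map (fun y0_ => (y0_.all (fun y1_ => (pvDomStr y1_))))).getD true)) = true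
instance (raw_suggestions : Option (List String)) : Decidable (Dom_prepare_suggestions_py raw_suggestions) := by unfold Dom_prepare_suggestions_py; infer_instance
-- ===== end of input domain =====

-- B replaces A's seen-set dedup-then-sort by a declarative pipeline: filter/strip + stable sort by casefold,
-- then a zip-with-shifted-self comprehension keeping elements whose key differs from their predecessor; objective: alternative.
-- On the printable-ASCII domain str.casefold == str.lower, so both ports use PySem.Str.lower; all list elements are str, so A's isinstance check is always true.

-- ===== PORT A =====
def prepare_suggestions_py (raw_suggestions : Option (List String)) : List String :=
  match raw_suggestions with
  | none => []
  | some xs =>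
    if xs = [] then []           -- 'if not raw_suggestions'
    else
      let st := xs.foldl (fun (st : PySem.Set String × List String) suggestion =>
        let text := PySem.Str.strip suggestion
        if text = "" then st
        else
          let key := PySem.Str.lower text
          if PySem.Set.contains st.1 key then st
          else (PySem.Set.add st.1 key, st.2 ++ [text])) (PySem.Set.empty, [])
      PySem.List.sorted st.2 PySem.Str.lower

-- ===== PORT B =====
def prepare_suggestions_py_alt (raw_suggestions : Option (List String)) : List String :=
  match raw_suggestions with
  | none => []
  | some xs =>
    if xs = [] then []           -- 'if not raw_suggestions'
    else
      -- cleaned = sorted((s.strip() for s in xs if s.strip()), key=str.casefold)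
      let cleaned := PySem.List.sorted
        ((xs.filter (fun s => PySem.Str.strip s != "")).map PySem.Str.strip) PySem.Str.lower
      match cleaned with
      | [] => []
      | c0 :: rest =>
        -- [cleaned[0]] + [t for prev, t in zip(cleaned, cleaned[1:]) if prev.casefold() != t.casefold()]
        c0 :: ((c0 :: rest).zip rest).filterMap (fun pt =>
          if PySem.Str.lower pt.1 ≠ PySem.Str.lower pt.2 then some pt.2 else none)

-- ===== PRECONDITION & SPEC =====
def Spec_prepare_suggestions_py (raw_suggestions : Option (List String)) (out : List String) : Prop := out = prepare_suggestions_py_alt raw_suggestions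
instance (raw_suggestions : Option (List String)) (out : List String) : Decidable (Spec_prepare_suggestions_py raw_suggestions out) := by unfold Spec_prepare_suggestions_py; infer_instance

-- ===== CLAIM (what is proved, stated in full; the proofs are below) =====
def Claim_equal_prepare_suggestions_py : Prop := ∀ (raw_suggestions : Option (List String)), Dom_prepare_suggestions_py raw_suggestions → Spec_prepare_suggestions_py raw_suggestions (prepare_suggestions_py raw_suggestions)

-- ===== LEMMAS AND PROOFS =====

-- strip + drop-empty pass (the shape of A's cleaning)
def pvClean : List String → List String
  | [] => []
  | s :: r => if PySem.Str.strip s = "" then pvClean r else PySem.Str.strip s :: pvClean r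

-- first-occurrence dedup by lowercase key (A's loop, on an already-cleaned list)
def pvDF (seen : List String) : List String → List String
  | [] => []
  | t :: r =>
    if PySem.Str.lower t ∈ seen then pvDF seen r
    else t :: pvDF (seen ++ [PySem.Str.lower t]) r

-- adjacent dedup by lowercase key of the last KEPT element
def pvDA (last : Option String) : List String → List String
  | [] => []
  | t :: r =>
    if last = some (PySem.Str.lower t) then pvDA last r
    else t :: pvDA (some (PySem.Str.lower t)) r

-- adjacent dedup comparing with the immediate PREDECESSOR (B's zip comprehension)
def pvGo (prev : String) : List String → List String
  | [] => []
  | t :: r =>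
    if PySem.Str.lower prev = PySem.Str.lower t then pvGo t r else t :: pvGo t r

lemma pvClean_eq (xs : List String) :
    (xs.filter (fun s => PySem.Str.strip s != "")).map PySem.Str.strip = pvClean xs := by
  induction xs with
  | nil => rfl
  | cons s r ih =>
    by_cases h : PySem.Str.strip s = "" <;> simp [pvClean, h, ih]

lemma pvZip_filterMap (l : List String) : ∀ prev : String,
    ((prev :: l).zip l).filterMap (fun pt =>
      if PySem.Str.lower pt.1 ≠ PySem.Str.lower pt.2 then some pt.2 else none) = pvGo prev l := by
  induction l with
  | nil => intro prev; rfl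
  | cons t r ih =>
    intro prev
    have hz : ((prev :: (t :: r)).zip (t :: r)) = (prev, t) :: ((t :: r).zip r) := rfl
    rw [hz, List.filterMap_cons, ih t]
    by_cases h : PySem.Str.lower prev = PySem.Str.lower t <;> simp [pvGo, h]

lemma pvGo_eq_pvDA (l : List String) : ∀ prev : String,
    pvGo prev l = pvDA (some (PySem.Str.lower prev)) l := by
  induction l with
  | nil => intro prev; rfl
  | cons t r ih =>
    intro prev
    by_cases h : PySem.Str.lower prev = PySem.Str.lower t
    · simp only [pvGo, pvDA, ih, h]
    · simp only [pvGo, if_neg h, pvDA,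
        if_neg (fun e : some (PySem.Str.lower prev) = some (PySem.Str.lower t) =>
          h (Option.some_inj.mp e)), ih]

lemma pvDF_foldl (xs : List String) : ∀ (seen : PySem.Set String) (acc : List String),
    (xs.foldl (fun (st : PySem.Set String × List String) suggestion =>
      let text := PySem.Str.strip suggestion
      if text = "" then st
      else
        let key := PySem.Str.lower text
        if PySem.Set.contains st.1 key then st
        else (PySem.Set.add st.1 key, st.2 ++ [text])) (seen, acc)).2
      = acc ++ pvDF seen (pvClean xs) := by
  induction xs with
  | nil => intro seen acc; simp [pvClean, pvDF]
  | cons s r ih =>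
    intro seen acc
    rw [List.foldl_cons]
    show (List.foldl _ (if PySem.Str.strip s = "" then (seen, acc)
        else if PySem.Set.contains seen (PySem.Str.lower (PySem.Str.strip s)) = true then (seen, acc)
        else (PySem.Set.add seen (PySem.Str.lower (PySem.Str.strip s)), acc ++ [PySem.Str.strip s])) r).2 = _
    by_cases h : PySem.Str.strip s = ""
    · rw [if_pos h]
      simp only [pvClean, if_pos h]
      exact ih seen acc
    · rw [if_neg h]
      by_cases hc : PySem.Str.lower (PySem.Str.strip s) ∈ seen
      · have hb : PySem.Set.contains seen (PySem.Str.lower (PySem.Str.strip s)) = true := by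
          simp [PySem.Set.contains]; exact hc
        rw [if_pos hb]
        simp only [pvClean, if_neg h, pvDF, if_pos hc]
        exact ih seen acc
      · have hb : ¬ PySem.Set.contains seen (PySem.Str.lower (PySem.Str.strip s)) = true := by
          simp [PySem.Set.contains]; exact hc
        have hadd : PySem.Set.add seen (PySem.Str.lower (PySem.Str.strip s))
            = seen ++ [PySem.Str.lower (PySem.Str.strip s)] := by
          simp [PySem.Set.add, PySem.Set.contains]; intro hm; exact absurd hm hc
        rw [if_neg hb, hadd]
        simp only [pvClean, if_neg h, pvDF, if_neg hc]
        rw [ih]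
        simp

lemma pvDF_snoc (x : String) (ys : List String) : ∀ seen : List String,
    pvDF seen (ys ++ [x]) =
      pvDF seen ys ++
        (if PySem.Str.lower x ∈ seen ∨ PySem.Str.lower x ∈ ys.map PySem.Str.lower then [] else [x]) := by
  induction ys with
  | nil => intro seen; by_cases h : PySem.Str.lower x ∈ seen <;> simp [pvDF, h]
  | cons t r ih =>
    intro seen
    by_cases h : PySem.Str.lower t ∈ seen
    · have hiff : (PySem.Str.lower x ∈ seen ∨ PySem.Str.lower x ∈ r.map PySem.Str.lower)
          ↔ (PySem.Str.lower x ∈ seen ∨ PySem.Str.lower x ∈ (t :: r).map PySem.Str.lower) := by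
        simp only [List.map_cons, List.mem_cons]
        constructor
        · tauto
        · rintro (a | b | c)
          · tauto
          · exact Or.inl (b ▸ h)
          · tauto
      simp only [List.cons_append, pvDF, if_pos h]
      rw [ih seen, if_congr hiff rfl rfl]
    · have hiff : (PySem.Str.lower x ∈ seen ++ [PySem.Str.lower t] ∨ PySem.Str.lower x ∈ r.map PySem.Str.lower)
          ↔ (PySem.Str.lower x ∈ seen ∨ PySem.Str.lower x ∈ (t :: r).map PySem.Str.lower) := by
        simp only [List.map_cons, List.mem_cons, List.mem_append]
        tauto
      simp only [List.cons_append, pvDF, if_neg h]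
      rw [ih (seen ++ [PySem.Str.lower t]), if_congr hiff rfl rfl]

lemma pvSorted_snoc (ys : List String) (x : String) :
    PySem.List.sorted (ys ++ [x]) PySem.Str.lower =
      PySem.List.insertBy (fun a b => decide (PySem.Str.lower a < PySem.Str.lower b)) x
        (PySem.List.sorted ys PySem.Str.lower) := by
  rw [PySem.List.sorted_eq_foldl_insertBy, PySem.List.sorted_eq_foldl_insertBy, List.foldl_append]
  rfl

-- inserting a fresh key commutes with adjacent dedup
lemma pvDA_insert_fresh (x : String) : ∀ (s : List String) (last : Option String),
    s.Pairwise (fun a b => PySem.Str.lower a ≤ PySem.Str.lower b) →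
    (∀ y ∈ s, PySem.Str.lower y ≠ PySem.Str.lower x) →
    (∀ k0, last = some k0 → k0 < PySem.Str.lower x) →
    pvDA last (PySem.List.insertBy (fun a b => decide (PySem.Str.lower a < PySem.Str.lower b)) x s)
      = PySem.List.insertBy (fun a b => decide (PySem.Str.lower a < PySem.Str.lower b)) x (pvDA last s) := by
  intro s
  induction s with
  | nil =>
    intro last _ _ hlast
    have hne : ¬ last = some (PySem.Str.lower x) := fun e => lt_irrefl _ (hlast _ e)
    simp [PySem.List.insertBy, pvDA, hne]
  | cons y r ih =>
    intro last hpw hfresh hlast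
    have hky : PySem.Str.lower y ≠ PySem.Str.lower x := hfresh y List.mem_cons_self
    have hyr : ∀ z ∈ r, PySem.Str.lower y ≤ PySem.Str.lower z := (List.pairwise_cons.mp hpw).1
    have hpwr : r.Pairwise (fun a b => PySem.Str.lower a ≤ PySem.Str.lower b) :=
      (List.pairwise_cons.mp hpw).2
    by_cases hb : PySem.Str.lower x < PySem.Str.lower y
    · have hlx : ¬ last = some (PySem.Str.lower x) := fun e => lt_irrefl _ (hlast _ e)
      have hly : ¬ last = some (PySem.Str.lower y) := fun e => absurd hb (not_lt_of_gt (hlast _ e))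
      have h2 : ¬ (some (PySem.Str.lower x) = some (PySem.Str.lower y)) := by
        simp only [Option.some.injEq]; exact fun e => hky e.symm
      rw [show PySem.List.insertBy (fun a b => decide (PySem.Str.lower a < PySem.Str.lower b)) x (y :: r)
            = x :: y :: r from by simp [PySem.List.insertBy, hb]]
      rw [show pvDA last (y :: r) = y :: pvDA (some (PySem.Str.lower y)) r from by simp [pvDA, hly]]
      rw [show PySem.List.insertBy (fun a b => decide (PySem.Str.lower a < PySem.Str.lower b)) x
            (y :: pvDA (some (PySem.Str.lower y)) r) = x :: y :: pvDA (some (PySem.Str.lower y)) r from by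
          simp [PySem.List.insertBy, hb]]
      simp [pvDA, hlx, h2]
    · have hylt : PySem.Str.lower y < PySem.Str.lower x := lt_of_le_of_ne (not_lt.mp hb) hky
      rw [show PySem.List.insertBy (fun a b => decide (PySem.Str.lower a < PySem.Str.lower b)) x (y :: r)
            = y :: PySem.List.insertBy (fun a b => decide (PySem.Str.lower a < PySem.Str.lower b)) x r from by
          simp [PySem.List.insertBy, hb]]
      have hfr : ∀ z ∈ r, PySem.Str.lower z ≠ PySem.Str.lower x :=
        fun z hz => hfresh z (List.mem_cons_of_mem _ hz)
      by_cases hl : last = some (PySem.Str.lower y)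
      · simp only [pvDA, if_pos hl]
        exact ih last hpwr hfr hlast
      · simp only [pvDA, if_neg hl]
        rw [ih (some (PySem.Str.lower y)) hpwr hfr
          (fun k0 e => (Option.some_inj.mp e) ▸ hylt)]
        simp [PySem.List.insertBy, hb]

-- inserting an already-present key is absorbed by adjacent dedup
lemma pvDA_insert_dup (x : String) : ∀ (s : List String) (last : Option String),
    s.Pairwise (fun a b => PySem.Str.lower a ≤ PySem.Str.lower b) →
    PySem.Str.lower x ∈ s.map PySem.Str.lower →
    pvDA last (PySem.List.insertBy (fun a b => decide (PySem.Str.lower a < PySem.Str.lower b)) x s)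
      = pvDA last s := by
  intro s
  induction s with
  | nil => intro last _ hmem; simp at hmem
  | cons y r ih =>
    intro last hpw hmem
    have hyr : ∀ z ∈ r, PySem.Str.lower y ≤ PySem.Str.lower z := (List.pairwise_cons.mp hpw).1
    have hpwr : r.Pairwise (fun a b => PySem.Str.lower a ≤ PySem.Str.lower b) :=
      (List.pairwise_cons.mp hpw).2
    by_cases hb : PySem.Str.lower x < PySem.Str.lower y
    · exfalso
      rcases (by simpa using hmem :
          PySem.Str.lower x = PySem.Str.lower y ∨ ∃ a ∈ r, PySem.Str.lower a = PySem.Str.lower x) with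
        e | ⟨z, hz, ez⟩
      · exact lt_irrefl _ (e ▸ hb)
      · exact absurd hb (not_lt.mpr (ez ▸ hyr z hz))
    · rw [show PySem.List.insertBy (fun a b => decide (PySem.Str.lower a < PySem.Str.lower b)) x (y :: r)
            = y :: PySem.List.insertBy (fun a b => decide (PySem.Str.lower a < PySem.Str.lower b)) x r from by
          simp [PySem.List.insertBy, hb]]
      by_cases hmr : PySem.Str.lower x ∈ r.map PySem.Str.lower
      · by_cases hl : last = some (PySem.Str.lower y)
        · simp only [pvDA, if_pos hl]
          exact ih last hpwr hmr
        · simp only [pvDA, if_neg hl]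
          rw [ih (some (PySem.Str.lower y)) hpwr hmr]
      · have hkxy : PySem.Str.lower x = PySem.Str.lower y := by
          rcases (by simpa using hmem :
              PySem.Str.lower x = PySem.Str.lower y ∨ ∃ a ∈ r, PySem.Str.lower a = PySem.Str.lower x) with
            e | ⟨z, hz, ez⟩
          · exact e
          · exact absurd (List.mem_map.mpr ⟨z, hz, ez⟩) hmr
        have hins : PySem.List.insertBy (fun a b => decide (PySem.Str.lower a < PySem.Str.lower b)) x r
            = x :: r := by
          cases r with
          | nil => simp [PySem.List.insertBy]
          | cons z r' =>
            have hz : PySem.Str.lower y ≤ PySem.Str.lower z := hyr z List.mem_cons_self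
            have hzne : PySem.Str.lower z ≠ PySem.Str.lower x := by
              intro e
              exact hmr (List.mem_map.mpr ⟨z, List.mem_cons_self, e⟩)
            have hlt : PySem.Str.lower x < PySem.Str.lower z :=
              lt_of_le_of_ne (hkxy ▸ hz) (Ne.symm hzne)
            simp [PySem.List.insertBy, hlt]
        rw [hins]
        by_cases hl : last = some (PySem.Str.lower y)
        · simp only [pvDA, if_pos hl]
          simp [hl, hkxy]
        · simp only [pvDA, if_neg hl]
          simp [hkxy]

-- MAIN: sorting the first-occurrence dedup = adjacent dedup of the stable sort
lemma pvMain (ys : List String) :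
    PySem.List.sorted (pvDF [] ys) PySem.Str.lower =
      pvDA none (PySem.List.sorted ys PySem.Str.lower) := by
  induction ys using List.reverseRecOn with
  | nil => rfl
  | append_singleton ys x ih =>
    rw [pvSorted_snoc, pvDF_snoc]
    by_cases hm : PySem.Str.lower x ∈ ys.map PySem.Str.lower
    · rw [if_pos (Or.inr hm)]
      have hmem' : PySem.Str.lower x ∈ (PySem.List.sorted ys PySem.Str.lower).map PySem.Str.lower := by
        rcases List.mem_map.mp hm with ⟨z, hz, ez⟩
        exact List.mem_map.mpr ⟨z, (PySem.List.mem_sorted ys PySem.Str.lower false z).mpr hz, ez⟩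
      rw [pvDA_insert_dup x (PySem.List.sorted ys PySem.Str.lower) none
        (PySem.List.sorted_pairwise ys PySem.Str.lower) hmem']
      simpa using ih
    · rw [if_neg (by simpa using hm)]
      rw [pvSorted_snoc, ih]
      rw [pvDA_insert_fresh x (PySem.List.sorted ys PySem.Str.lower) none
        (PySem.List.sorted_pairwise ys PySem.Str.lower)
        (fun y hy e => hm (List.mem_map.mpr ⟨y, (PySem.List.mem_sorted ys PySem.Str.lower false y).mp hy, e⟩))
        (fun k0 e => by simp at e)]

-- ===== VERDICT (by name: the statement is the Claim_ definition above) =====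
theorem prepare_suggestions_py_spec : Claim_equal_prepare_suggestions_py := by
  intro raw _
  unfold Spec_prepare_suggestions_py prepare_suggestions_py prepare_suggestions_py_alt
  cases raw with
  | none => rfl
  | some xs =>
    by_cases h : xs = []
    · simp [h]
    · simp only [h, if_false]
      rw [pvDF_foldl, pvClean_eq]
      simp only [PySem.Set.empty, List.nil_append]
      rw [pvMain (pvClean xs)]
      cases hc : PySem.List.sorted (pvClean xs) PySem.Str.lower with
      | nil => rfl
      | cons c0 rest =>
        change pvDA none (c0 :: rest) = c0 :: List.filterMap
          (fun pt => if PySem.Str.lower pt.1 ≠ PySem.Str.lower pt.2 then some pt.2 else none)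
          ((c0 :: rest).zip rest)
        rw [pvZip_filterMap rest c0, pvGo_eq_pvDA]
        simp [pvDA]
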